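-- pv_equiv track=rewrite | github.com/FudanSELab/LinuxKernelKG | pipeline/entity_fusion.py | _check_gerund_relation
-- ===== SOURCE A (Python) =====
-- def _check_gerund_relation(name1, name2):
--     """检查两个名称是否为动词原形和动名词关系
--
--     处理常见的动名词变化:
--     - 一般情况: 加'ing' (read/reading)
--     - 以e结尾: 去e加ing (write/writing)
--     - 短元音+辅音结尾: 双写辅音加ing (run/running)
--
--     Args:
--         name1, name2: 要比较的两个名称
--
--     Returns:
--         bool: 如果两个名称是动词原形和动名词关系，返回True
--     """
--     n1, n2 = name1.lower(), name2.lower()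
--
--     # 基本情况: 加ing
--     if (n1.endswith('ing') and n1[:-3] == n2) or (n2.endswith('ing') and n2[:-3] == n1):
--         return True
--
--     # e结尾情况: 去e加ing
--     if (n1.endswith('ing') and n2.endswith('e') and n1[:-3] == n2[:-1]) or \
--        (n2.endswith('ing') and n1.endswith('e') and n2[:-3] == n1[:-1]):
--         return True
--
--     # 常见的双写辅音情况
--     consonant_doubles = ['run', 'sit', 'begin', 'swim', 'stop']
--     for base in consonant_doubles:
--         gerund = base + base[-1] + 'ing'  # 如 running, sitting
--         if (n1 == base and n2 == gerund) or (n1 == gerund and n2 == base):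
--             return True
--
--     return False
-- ===== SOURCE B (Python) =====
-- def _gerunds(w):
--     """All gerund forms this word could generate as a base verb."""
--     forms = {w + 'ing'}
--     if w.endswith('e'):
--         forms.add(w[:-1] + 'ing')
--     if w in ('run', 'sit', 'begin', 'swim', 'stop'):
--         forms.add(w + w[-1] + 'ing')
--     return forms
--
--
-- def _check_gerund_relation(name1, name2):
--     n1, n2 = name1.lower(), name2.lower()
--     return n2 in _gerunds(n1) or n1 in _gerunds(n2)
-- ===== Notes on version B (the rewrite author's own statement) =====
-- stated objective: simpler
-- what changed: Replaces A's suffix-stripping comparisons (strip 'ing' and compare, plus a loop over five doubling bases) by forward generation: a helper builds the set of gerund forms a base word could produce, and the function is two set-membership tests.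
import Mathlib
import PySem

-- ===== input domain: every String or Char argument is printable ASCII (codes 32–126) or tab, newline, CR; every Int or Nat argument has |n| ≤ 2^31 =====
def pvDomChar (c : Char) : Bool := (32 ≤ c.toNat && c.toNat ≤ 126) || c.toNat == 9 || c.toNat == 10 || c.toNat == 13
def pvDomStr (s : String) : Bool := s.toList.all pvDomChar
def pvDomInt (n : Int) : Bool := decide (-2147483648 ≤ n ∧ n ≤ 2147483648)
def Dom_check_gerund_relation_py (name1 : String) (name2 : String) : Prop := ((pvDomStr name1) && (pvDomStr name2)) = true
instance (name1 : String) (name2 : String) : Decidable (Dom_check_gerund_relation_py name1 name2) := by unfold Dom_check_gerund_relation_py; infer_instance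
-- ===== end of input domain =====

-- B replaces A's suffix-stripping comparisons with forward gerund-candidate generation plus set membership (objective: simpler).

-- ===== PORT A =====
def pvConsonantDoubles : List String := ["run", "sit", "begin", "swim", "stop"]

def check_gerund_relation_py (name1 : String) (name2 : String) : Bool :=
  let n1 := PySem.Str.lower name1
  let n2 := PySem.Str.lower name2
  if (PySem.Str.endswith n1 "ing" && (PySem.Str.slice n1 none (some (-3)) == n2))
      || (PySem.Str.endswith n2 "ing" && (PySem.Str.slice n2 none (some (-3)) == n1)) then
    true
  else if (PySem.Str.endswith n1 "ing" && PySem.Str.endswith n2 "e"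
            && (PySem.Str.slice n1 none (some (-3)) == PySem.Str.slice n2 none (some (-1))))
      || (PySem.Str.endswith n2 "ing" && PySem.Str.endswith n1 "e"
            && (PySem.Str.slice n2 none (some (-3)) == PySem.Str.slice n1 none (some (-1)))) then
    true
  else
    -- for-loop with early 'return True' ported as List.any; base[-1] via pyGet? (exact: every base is nonempty, so the Option holds one char)
    pvConsonantDoubles.any (fun base =>
      let gerund := base ++ String.ofList (PySem.Str.pyGet? base (-1)).toList ++ "ing"
      (n1 == base && n2 == gerund) || (n1 == gerund && n2 == base))

-- ===== PORT B =====
-- all gerund forms the base word w could generate (Python set → PySem.Set)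
def pvGerunds (w : String) : PySem.Set String :=
  let forms : PySem.Set String := PySem.Set.ofList [w ++ "ing"]
  let forms := if PySem.Str.endswith w "e" then
      PySem.Set.add forms (PySem.Str.slice w none (some (-1)) ++ "ing")
    else forms
  let forms := if ["run", "sit", "begin", "swim", "stop"].contains w then
      -- w[-1] via pyGet? (exact: only reached when w is one of the nonempty literals)
      PySem.Set.add forms (w ++ String.ofList (PySem.Str.pyGet? w (-1)).toList ++ "ing")
    else forms
  forms

def check_gerund_relation_py_alt (name1 : String) (name2 : String) : Bool :=
  let n1 := PySem.Str.lower name1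
  let n2 := PySem.Str.lower name2
  PySem.Set.contains (pvGerunds n1) n2 || PySem.Set.contains (pvGerunds n2) n1

-- ===== PRECONDITION & SPEC =====
def Spec_check_gerund_relation_py (name1 : String) (name2 : String) (out : Bool) : Prop := out = check_gerund_relation_py_alt name1 name2
instance (name1 : String) (name2 : String) (out : Bool) : Decidable (Spec_check_gerund_relation_py name1 name2 out) := by unfold Spec_check_gerund_relation_py; infer_instance

-- ===== CLAIM (what is proved, stated in full; the proofs are below) =====
def Claim_equal_check_gerund_relation_py : Prop := ∀ (name1 : String) (name2 : String), Dom_check_gerund_relation_py name1 name2 → Spec_check_gerund_relation_py name1 name2 (check_gerund_relation_py name1 name2)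

-- ===== LEMMAS AND PROOFS =====

-- the relation both programs decide: g is one of the gerund forms of base b
def pvGer (b g : String) : Prop :=
  g = b ++ "ing"
  ∨ (PySem.Str.endswith b "e" = true ∧ g = PySem.Str.slice b none (some (-1)) ++ "ing")
  ∨ ((b = "run" ∨ b = "sit" ∨ b = "begin" ∨ b = "swim" ∨ b = "stop")
      ∧ g = b ++ String.ofList (PySem.Str.pyGet? b (-1)).toList ++ "ing")

lemma strip_ing_iff (s t : String) :
    (PySem.Str.endswith s "ing" = true ∧ PySem.Str.slice s none (some (-3)) = t) ↔ s = t ++ "ing" := by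
  rw [PySem.Str.endswith_eq, ← String.toList_inj, ← String.toList_inj, PySem.Str.toList_slice,
      PySem.Chars.slice_eq_listSlice, PySem.List.slice_to_neg_ofNat _ 3 (by omega),
      String.toList_append, PySem.Chars.endswith_iff]
  show (_ <:+ s.toList ∧ _) ↔ s.toList = t.toList ++ "ing".toList
  generalize s.toList = cs; generalize t.toList = ds
  constructor
  · rintro ⟨⟨u, rfl⟩, rfl⟩
    simp
  · rintro rfl
    refine ⟨⟨ds, rfl⟩, by simp⟩

lemma mem_pvGerunds (w g : String) : (g ∈ pvGerunds w) ↔ pvGer w g := by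
  unfold pvGerunds pvGer
  dsimp only
  have hcon : (["run", "sit", "begin", "swim", "stop"] : List String).contains w = true
      ↔ (w = "run" ∨ w = "sit" ∨ w = "begin" ∨ w = "swim" ∨ w = "stop") := by
    simp only [List.contains_eq_mem, List.mem_cons, List.not_mem_nil, or_false,
      decide_eq_true_eq]
  by_cases he : PySem.Str.endswith w "e" = true <;>
    by_cases hd : (["run", "sit", "begin", "swim", "stop"] : List String).contains w = true
  · rw [if_pos he, if_pos hd, PySem.Set.mem_add, PySem.Set.mem_add, PySem.Set.mem_ofList,
        List.mem_singleton, eq_true (hcon.mp hd), eq_true he, true_and, true_and, or_assoc]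
  · rw [if_pos he, if_neg hd, PySem.Set.mem_add, PySem.Set.mem_ofList, List.mem_singleton,
        eq_true he, true_and, eq_false (fun h => hd (hcon.mpr h)), false_and, or_false]
  · rw [if_neg he, if_pos hd, PySem.Set.mem_add, PySem.Set.mem_ofList, List.mem_singleton,
        eq_false he, false_and, false_or, eq_true (hcon.mp hd), true_and]
  · rw [if_neg he, if_neg hd, PySem.Set.mem_ofList, List.mem_singleton, eq_false he, false_and,
        false_or, eq_false (fun h => hd (hcon.mpr h)), false_and, or_false]

lemma contains_pvGerunds (w g : String) : PySem.Set.contains (pvGerunds w) g = true ↔ pvGer w g := by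
  rw [show PySem.Set.contains (pvGerunds w) g = true ↔ g ∈ pvGerunds w by
        simp [PySem.Set.contains]]
  exact mem_pvGerunds w g

-- ===== VERDICT (by name: the statement is the Claim_ definition above) =====
set_option maxHeartbeats 800000 in
theorem check_gerund_relation_py_spec : Claim_equal_check_gerund_relation_py := by
  intro name1 name2 _
  unfold Spec_check_gerund_relation_py check_gerund_relation_py check_gerund_relation_py_alt
  dsimp only
  generalize PySem.Str.lower name1 = s
  generalize PySem.Str.lower name2 = t
  have hB : (PySem.Set.contains (pvGerunds s) t || PySem.Set.contains (pvGerunds t) s) = true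
      ↔ (pvGer s t ∨ pvGer t s) := by
    rw [Bool.or_eq_true, contains_pvGerunds, contains_pvGerunds]
  rw [Bool.eq_iff_iff, hB]
  unfold pvGer
  -- characterise A's three branch conditions
  have h1 : ((PySem.Str.endswith s "ing" && (PySem.Str.slice s none (some (-3)) == t))
      || (PySem.Str.endswith t "ing" && (PySem.Str.slice t none (some (-3)) == s))) = true
      ↔ (s = t ++ "ing" ∨ t = s ++ "ing") := by
    simp only [Bool.or_eq_true, Bool.and_eq_true, beq_iff_eq]
    rw [strip_ing_iff, strip_ing_iff]
  have h2 : ((PySem.Str.endswith s "ing" && PySem.Str.endswith t "e"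
        && (PySem.Str.slice s none (some (-3)) == PySem.Str.slice t none (some (-1))))
      || (PySem.Str.endswith t "ing" && PySem.Str.endswith s "e"
        && (PySem.Str.slice t none (some (-3)) == PySem.Str.slice s none (some (-1))))) = true
      ↔ ((PySem.Str.endswith t "e" = true ∧ s = PySem.Str.slice t none (some (-1)) ++ "ing")
        ∨ (PySem.Str.endswith s "e" = true ∧ t = PySem.Str.slice s none (some (-1)) ++ "ing")) := by
    simp only [Bool.or_eq_true, Bool.and_eq_true, beq_iff_eq]
    constructor
    · rintro (⟨⟨hi, he⟩, hq⟩ | ⟨⟨hi, he⟩, hq⟩)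
      · exact Or.inl ⟨he, (strip_ing_iff _ _).mp ⟨hi, hq⟩⟩
      · exact Or.inr ⟨he, (strip_ing_iff _ _).mp ⟨hi, hq⟩⟩
    · rintro (⟨he, hq⟩ | ⟨he, hq⟩)
      · obtain ⟨hi, hq'⟩ := (strip_ing_iff _ _).mpr hq
        exact Or.inl ⟨⟨hi, he⟩, hq'⟩
      · obtain ⟨hi, hq'⟩ := (strip_ing_iff _ _).mpr hq
        exact Or.inr ⟨⟨hi, he⟩, hq'⟩
  have h3 : (pvConsonantDoubles.any (fun base =>
        let gerund := base ++ String.ofList (PySem.Str.pyGet? base (-1)).toList ++ "ing"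
        (s == base && t == gerund) || (s == gerund && t == base))) = true
      ↔ (((s = "run" ∨ s = "sit" ∨ s = "begin" ∨ s = "swim" ∨ s = "stop")
            ∧ t = s ++ String.ofList (PySem.Str.pyGet? s (-1)).toList ++ "ing")
        ∨ ((t = "run" ∨ t = "sit" ∨ t = "begin" ∨ t = "swim" ∨ t = "stop")
            ∧ s = t ++ String.ofList (PySem.Str.pyGet? t (-1)).toList ++ "ing")) := by
    simp only [pvConsonantDoubles, List.any_cons, List.any_nil, Bool.or_false, Bool.or_eq_true,
      Bool.and_eq_true, beq_iff_eq]
    constructor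
    · rintro ((⟨rfl, rfl⟩ | ⟨rfl, rfl⟩) | (⟨rfl, rfl⟩ | ⟨rfl, rfl⟩) | (⟨rfl, rfl⟩ | ⟨rfl, rfl⟩)
        | (⟨rfl, rfl⟩ | ⟨rfl, rfl⟩) | (⟨rfl, rfl⟩ | ⟨rfl, rfl⟩))
      · exact Or.inl ⟨Or.inl rfl, rfl⟩
      · exact Or.inr ⟨Or.inl rfl, rfl⟩
      · exact Or.inl ⟨Or.inr (Or.inl rfl), rfl⟩
      · exact Or.inr ⟨Or.inr (Or.inl rfl), rfl⟩
      · exact Or.inl ⟨Or.inr (Or.inr (Or.inl rfl)), rfl⟩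
      · exact Or.inr ⟨Or.inr (Or.inr (Or.inl rfl)), rfl⟩
      · exact Or.inl ⟨Or.inr (Or.inr (Or.inr (Or.inl rfl))), rfl⟩
      · exact Or.inr ⟨Or.inr (Or.inr (Or.inr (Or.inl rfl))), rfl⟩
      · exact Or.inl ⟨Or.inr (Or.inr (Or.inr (Or.inr rfl))), rfl⟩
      · exact Or.inr ⟨Or.inr (Or.inr (Or.inr (Or.inr rfl))), rfl⟩
    · rintro (⟨(rfl | rfl | rfl | rfl | rfl), rfl⟩ | ⟨(rfl | rfl | rfl | rfl | rfl), rfl⟩)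
      · exact Or.inl (Or.inl ⟨rfl, rfl⟩)
      · exact Or.inr (Or.inl (Or.inl ⟨rfl, rfl⟩))
      · exact Or.inr (Or.inr (Or.inl (Or.inl ⟨rfl, rfl⟩)))
      · exact Or.inr (Or.inr (Or.inr (Or.inl (Or.inl ⟨rfl, rfl⟩))))
      · exact Or.inr (Or.inr (Or.inr (Or.inr (Or.inl ⟨rfl, rfl⟩))))
      · exact Or.inl (Or.inr ⟨rfl, rfl⟩)
      · exact Or.inr (Or.inl (Or.inr ⟨rfl, rfl⟩))
      · exact Or.inr (Or.inr (Or.inl (Or.inr ⟨rfl, rfl⟩)))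
      · exact Or.inr (Or.inr (Or.inr (Or.inl (Or.inr ⟨rfl, rfl⟩))))
      · exact Or.inr (Or.inr (Or.inr (Or.inr (Or.inr ⟨rfl, rfl⟩))))
  split_ifs with c1 c2
  · rw [h1] at c1
    revert c1
    generalize (s = t ++ "ing") = B1
    generalize (t = s ++ "ing") = A1
    generalize (PySem.Str.endswith s "e" = true) = A2
    generalize (t = PySem.Str.slice s none (some (-1)) ++ "ing") = A3
    generalize (PySem.Str.endswith t "e" = true) = B2
    generalize (s = PySem.Str.slice t none (some (-1)) ++ "ing") = B3
    generalize (s = "run") = A4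
    generalize (s = "sit") = A5
    generalize (s = "begin") = A6
    generalize (s = "swim") = A7
    generalize (s = "stop") = A8
    generalize (t = s ++ String.ofList (PySem.Str.pyGet? s (-1)).toList ++ "ing") = A9
    generalize (t = "run") = B4
    generalize (t = "sit") = B5
    generalize (t = "begin") = B6
    generalize (t = "swim") = B7
    generalize (t = "stop") = B8
    generalize (s = t ++ String.ofList (PySem.Str.pyGet? t (-1)).toList ++ "ing") = B9
    exact fun c1 => ⟨fun _ => c1.elim (fun h => Or.inr (Or.inl h)) (fun h => Or.inl (Or.inl h)),
      fun _ => rfl⟩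
  · rw [h2] at c2
    revert c2
    generalize (s = t ++ "ing") = B1
    generalize (t = s ++ "ing") = A1
    generalize (PySem.Str.endswith s "e" = true) = A2
    generalize (t = PySem.Str.slice s none (some (-1)) ++ "ing") = A3
    generalize (PySem.Str.endswith t "e" = true) = B2
    generalize (s = PySem.Str.slice t none (some (-1)) ++ "ing") = B3
    generalize (s = "run") = A4
    generalize (s = "sit") = A5
    generalize (s = "begin") = A6
    generalize (s = "swim") = A7
    generalize (s = "stop") = A8
    generalize (t = s ++ String.ofList (PySem.Str.pyGet? s (-1)).toList ++ "ing") = A9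
    generalize (t = "run") = B4
    generalize (t = "sit") = B5
    generalize (t = "begin") = B6
    generalize (t = "swim") = B7
    generalize (t = "stop") = B8
    generalize (s = t ++ String.ofList (PySem.Str.pyGet? t (-1)).toList ++ "ing") = B9
    exact fun c2 => ⟨fun _ => c2.elim (fun h => Or.inr (Or.inr (Or.inl h)))
      (fun h => Or.inl (Or.inr (Or.inl h))), fun _ => rfl⟩
  · rw [h1] at c1
    rw [h2] at c2
    rw [h3]
    revert c1 c2
    generalize (s = t ++ "ing") = B1
    generalize (t = s ++ "ing") = A1
    generalize (PySem.Str.endswith s "e" = true) = A2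
    generalize (t = PySem.Str.slice s none (some (-1)) ++ "ing") = A3
    generalize (PySem.Str.endswith t "e" = true) = B2
    generalize (s = PySem.Str.slice t none (some (-1)) ++ "ing") = B3
    generalize (s = "run") = A4
    generalize (s = "sit") = A5
    generalize (s = "begin") = A6
    generalize (s = "swim") = A7
    generalize (s = "stop") = A8
    generalize (t = s ++ String.ofList (PySem.Str.pyGet? s (-1)).toList ++ "ing") = A9
    generalize (t = "run") = B4
    generalize (t = "sit") = B5
    generalize (t = "begin") = B6
    generalize (t = "swim") = B7
    generalize (t = "stop") = B8
    generalize (s = t ++ String.ofList (PySem.Str.pyGet? t (-1)).toList ++ "ing") = B9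
    intro nc1 nc2
    constructor
    · rintro (h | h)
      · exact Or.inl (Or.inr (Or.inr h))
      · exact Or.inr (Or.inr (Or.inr h))
    · rintro ((h | h | h) | (h | h | h))
      · exact absurd (Or.inr h) nc1
      · exact absurd (Or.inr h) nc2
      · exact Or.inl h
      · exact absurd (Or.inl h) nc1
      · exact absurd (Or.inl h) nc2
      · exact Or.inr h
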